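-- pv_equiv track=rewrite | github.com/holdenc20/NinetyNine | NinetyNineEnv.py | best_card
-- ===== SOURCE A (Python) =====
-- def best_card(trick, trump, first_player):
--     lead_card = trick[first_player]
--     lead_suit = lead_card // 13
--
--     best_card = -1
--     best_player = -1
--
--     for player, card in enumerate(trick):
--
--         suit = card // 13
--         rank = card % 13
--
--         if best_card == -1:
--             # First valid card, automatically the best
--             best_card = card
--             best_player = player
--         else:
--             best_suit = best_card // 13
--             best_rank = best_card % 13
--
--             if suit == trump and best_suit != trump:
--                 # Trump beats non-trump
--                 best_card = card
--                 best_player = player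
--             elif suit == best_suit and rank > best_rank:
--                 # Higher rank within the same suit
--                 best_card = card
--                 best_player = player
--             elif suit == lead_suit and best_suit != trump and best_suit != lead_suit:
--                 # Lead suit beats other non-trump suits
--                 best_card = card
--                 best_player = player
--
--     return best_player
-- ===== SOURCE B (Python) =====
-- def best_card(trick, trump, first_player):
--     lead_suit = trick[first_player] // 13
--     pairs = list(enumerate(trick))
--     pool = [pc for pc in pairs if pc[1] // 13 == trump]
--     if not pool:
--         pool = [pc for pc in pairs if pc[1] // 13 == lead_suit]
--     return max(pool, key=lambda pc: pc[1] % 13)[0]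
-- ===== Notes on version B (the rewrite author's own statement) =====
-- stated objective: simpler
-- what changed: B computes the winner by partition-then-select: collect the (player, card) pairs of trump suit (falling back to the lead suit, which always contains the led card), and take the first pair of maximal rank with Python's max(key=...), instead of A's sentinel-initialized sequential loop with four pairwise-comparison branches.
-- outside the precondition, e.g. on best_card([-1, 5], 3, 0): A returns 1, B returns 0
import Mathlib
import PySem

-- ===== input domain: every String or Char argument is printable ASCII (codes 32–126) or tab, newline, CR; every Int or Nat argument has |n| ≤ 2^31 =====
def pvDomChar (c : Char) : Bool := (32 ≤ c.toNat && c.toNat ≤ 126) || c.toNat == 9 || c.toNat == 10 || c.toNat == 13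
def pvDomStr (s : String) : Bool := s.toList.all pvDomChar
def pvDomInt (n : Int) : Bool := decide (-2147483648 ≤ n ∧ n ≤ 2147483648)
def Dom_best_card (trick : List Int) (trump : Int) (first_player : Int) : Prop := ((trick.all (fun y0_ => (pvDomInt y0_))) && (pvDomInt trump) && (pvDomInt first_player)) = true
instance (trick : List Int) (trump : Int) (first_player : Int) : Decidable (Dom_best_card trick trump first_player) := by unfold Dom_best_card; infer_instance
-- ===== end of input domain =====

-- B selects the winner by partition-then-first-max (trump pairs, else lead-suit pairs) instead of A's sentinel-initialized four-branch comparison loop; objective: simpler.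


-- ===== PORT A =====
-- A's loop body (one iteration of 'for player, card in enumerate(trick)'; state = (best_card, best_player))
def stepA (lead trump : Int) (s : Int × Int) (pc : Int × Int) : Int × Int :=
  if s.1 = -1 then (pc.2, pc.1)
  else if PySem.Int.floordiv pc.2 13 = trump ∧ PySem.Int.floordiv s.1 13 ≠ trump then (pc.2, pc.1)
  else if PySem.Int.floordiv pc.2 13 = PySem.Int.floordiv s.1 13 ∧
      PySem.Int.mod pc.2 13 > PySem.Int.mod s.1 13 then (pc.2, pc.1)
  else if PySem.Int.floordiv pc.2 13 = lead ∧ PySem.Int.floordiv s.1 13 ≠ trump ∧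
      PySem.Int.floordiv s.1 13 ≠ lead then (pc.2, pc.1)
  else s

def best_card (trick : List Int) (trump : Int) (first_player : Int) : Int :=
  let lead_card := PySem.List.pyGetD trick first_player 0   -- trick[first_player]; in range under Pre_
  let lead_suit := PySem.Int.floordiv lead_card 13
  ((PySem.List.enumerate trick 0).foldl (stepA lead_suit trump) (-1, -1)).2

-- ===== PORT B =====
def best_card_alt (trick : List Int) (trump : Int) (first_player : Int) : Int :=
  let lead_suit := PySem.Int.floordiv (PySem.List.pyGetD trick first_player 0) 13
  let pairs := PySem.List.enumerate trick 0
  let trumps := pairs.filter (fun pc => PySem.Int.floordiv pc.2 13 == trump)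
  let pool := if trumps = [] then pairs.filter (fun pc => PySem.Int.floordiv pc.2 13 == lead_suit) else trumps
  match PySem.List.max? pool (fun pc => PySem.Int.mod pc.2 13) with
  | some m => m.1
  | none => -1   -- unreachable under Pre_ (pool contains the led card); Python's max would raise ValueError

-- ===== PRECONDITION & SPEC =====
-- Pre_ excludes (a) out-of-range first_player, where both programs raise IndexError, and
-- (b) tricks containing the literal value -1 — not a card of any 0–51 deck — which collides with
-- A's uninitialized-best sentinel so that the next card replaces it unconditionally.
def Pre_best_card (trick : List Int) (trump : Int) (first_player : Int) : Prop :=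
  PySem.Raise.InRange trick.length first_player ∧ (-1 : Int) ∉ trick
instance (trick : List Int) (trump : Int) (first_player : Int) : Decidable (Pre_best_card trick trump first_player) := by unfold Pre_best_card; infer_instance

def pvWitness_best_card : List Int × Int × Int := ([5, 20, 33], 1, 0)

def Spec_best_card (trick : List Int) (trump : Int) (first_player : Int) (out : Int) : Prop := out = best_card_alt trick trump first_player
instance (trick : List Int) (trump : Int) (first_player : Int) (out : Int) : Decidable (Spec_best_card trick trump first_player out) := by unfold Spec_best_card; infer_instance

-- ===== CLAIM (what is proved, stated in full; the proofs are below) =====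
def Claim_equal_best_card : Prop := ∀ (trick : List Int) (trump : Int) (first_player : Int), Dom_best_card trick trump first_player → Pre_best_card trick trump first_player → Spec_best_card trick trump first_player (best_card trick trump first_player)

-- ===== LEMMAS AND PROOFS =====

-- the rank key and the suit test used by B's pools
def pvKey (pc : Int × Int) : Int := PySem.Int.mod pc.2 13
def pvIs (u : Int) (pc : Int × Int) : Bool := PySem.Int.floordiv pc.2 13 == u

-- Invariant for A's fold: after processing 'seen', the state is
-- (K0) untouched, or (K1) the first maximal-rank trump pair of 'seen', or (K2) no trump seen and
-- the first maximal-rank lead pair, or (K3) no trump and no lead seen yet, and some seen pair.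
def pvInv (lead trump : Int) (seen : List (Int × Int)) (s : Int × Int) : Prop :=
  (seen = [] ∧ s = (-1, -1))
  ∨ (∃ m, PySem.List.max? (seen.filter (pvIs trump)) pvKey = some m ∧ s = (m.2, m.1))
  ∨ (seen.filter (pvIs trump) = [] ∧
      ∃ m, PySem.List.max? (seen.filter (pvIs lead)) pvKey = some m ∧ s = (m.2, m.1))
  ∨ (seen.filter (pvIs trump) = [] ∧ seen.filter (pvIs lead) = [] ∧ ∃ pc ∈ seen, s = (pc.2, pc.1))

theorem pvIs_iff (u : Int) (pc : Int × Int) : pvIs u pc = true ↔ PySem.Int.floordiv pc.2 13 = u := by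
  simp only [pvIs, beq_iff_eq]

theorem max?_append_singleton {α : Type} (l : List α) (x : α) (key : α → Int) :
    PySem.List.max? (l ++ [x]) key =
      match PySem.List.max? l key with
      | none => some x
      | some m => if key m < key x then some x else some m := by
  unfold PySem.List.max?
  rw [List.foldl_append]
  rfl

theorem max?_singleton {α : Type} (x : α) (key : α → Int) :
    PySem.List.max? [x] key = some x := rfl

theorem inv_step (lead trump : Int) (seen : List (Int × Int)) (s pc : Int × Int)
    (hseen : ∀ q ∈ seen, q.2 ≠ -1) (hpc : pc.2 ≠ -1)
    (h : pvInv lead trump seen s) : pvInv lead trump (seen ++ [pc]) (stepA lead trump s pc) := by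
  have hfT : (seen ++ [pc]).filter (pvIs trump) =
      seen.filter (pvIs trump) ++ if pvIs trump pc then [pc] else [] := by
    simp [List.filter_append, List.filter_singleton]
  have hfL : (seen ++ [pc]).filter (pvIs lead) =
      seen.filter (pvIs lead) ++ if pvIs lead pc then [pc] else [] := by
    simp [List.filter_append, List.filter_singleton]
  rcases h with ⟨hs0, hs⟩ | ⟨m, hm, hs⟩ | ⟨hT, m, hm, hs⟩ | ⟨hT, hL, q, hq, hs⟩
  · -- K0: first card becomes best
    subst hs0 hs
    have hstep : stepA lead trump (-1, -1) pc = (pc.2, pc.1) := if_pos rfl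
    rw [List.nil_append, hstep]
    by_cases ht : pvIs trump pc
    · refine Or.inr (Or.inl ⟨pc, ?_, rfl⟩)
      simp [List.filter_singleton, ht, max?_singleton]
    · by_cases hl : pvIs lead pc
      · refine Or.inr (Or.inr (Or.inl ⟨?_, pc, ?_, rfl⟩))
        · simp [List.filter_singleton, ht]
        · simp [List.filter_singleton, hl, max?_singleton]
      · refine Or.inr (Or.inr (Or.inr ⟨?_, ?_, pc, by simp, rfl⟩))
        · simp [List.filter_singleton, ht]
        · simp [List.filter_singleton, hl]
  · -- K1: best is the first maximal trump pair
    have hmem := PySem.List.max?_mem hm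
    have hmT : pvIs trump m = true := List.of_mem_filter hmem
    have hmSeen : m ∈ seen := List.mem_of_mem_filter hmem
    have hm2 : m.2 ≠ -1 := hseen m hmSeen
    have hmsuit : PySem.Int.floordiv m.2 13 = trump := (pvIs_iff trump m).1 hmT
    subst hs
    refine Or.inr (Or.inl ?_)
    by_cases ht : pvIs trump pc
    · have hsuit : PySem.Int.floordiv pc.2 13 = trump := (pvIs_iff trump pc).1 ht
      refine ⟨if pvKey m < pvKey pc then pc else m, ?_, ?_⟩
      · rw [hfT, if_pos ht, max?_append_singleton, hm]
        by_cases hlt : pvKey m < pvKey pc <;> simp [hlt]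
      · by_cases hlt : pvKey m < pvKey pc
        · rw [show stepA lead trump (m.2, m.1) pc = (pc.2, pc.1) from by
            unfold stepA
            rw [if_neg (show ¬((m.2, m.1).1 = -1) from hm2),
              if_neg (by rintro ⟨-, h2⟩; exact h2 hmsuit),
              if_pos ⟨hsuit.trans hmsuit.symm, hlt⟩], if_pos hlt]
        · rw [show stepA lead trump (m.2, m.1) pc = (m.2, m.1) from by
            unfold stepA
            rw [if_neg (show ¬((m.2, m.1).1 = -1) from hm2),
              if_neg (by rintro ⟨-, h2⟩; exact h2 hmsuit),
              if_neg (by rintro ⟨-, h2⟩; exact hlt h2),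
              if_neg (by rintro ⟨-, h2, -⟩; exact h2 hmsuit)], if_neg hlt]
    · have hsuit : PySem.Int.floordiv pc.2 13 ≠ trump := fun h => ht ((pvIs_iff trump pc).2 h)
      refine ⟨m, ?_, ?_⟩
      · rw [hfT, if_neg ht, List.append_nil, hm]
      · rw [show stepA lead trump (m.2, m.1) pc = (m.2, m.1) from by
          unfold stepA
          rw [if_neg (show ¬((m.2, m.1).1 = -1) from hm2),
            if_neg (by rintro ⟨h1, -⟩; exact hsuit h1),
            if_neg (by rintro ⟨h1, -⟩; exact hsuit (h1.trans hmsuit)),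
            if_neg (by rintro ⟨-, h2, -⟩; exact h2 hmsuit)]]
  · -- K2: no trump seen, best is the first maximal lead pair
    have hmem := PySem.List.max?_mem hm
    have hmL : pvIs lead m = true := List.of_mem_filter hmem
    have hmSeen : m ∈ seen := List.mem_of_mem_filter hmem
    have hm2 : m.2 ≠ -1 := hseen m hmSeen
    have hmsuit : PySem.Int.floordiv m.2 13 = lead := (pvIs_iff lead m).1 hmL
    have hmnt : PySem.Int.floordiv m.2 13 ≠ trump := by
      intro hEq
      have hmem' : m ∈ seen.filter (pvIs trump) :=
        List.mem_filter.2 ⟨hmSeen, (pvIs_iff trump m).2 hEq⟩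
      rw [hT] at hmem'
      simp at hmem'
    subst hs
    by_cases ht : pvIs trump pc
    · -- new trump card takes over
      have hsuit : PySem.Int.floordiv pc.2 13 = trump := (pvIs_iff trump pc).1 ht
      refine Or.inr (Or.inl ⟨pc, ?_, ?_⟩)
      · rw [hfT, if_pos ht, hT, List.nil_append, max?_singleton]
      · rw [show stepA lead trump (m.2, m.1) pc = (pc.2, pc.1) from by
          unfold stepA
          rw [if_neg (show ¬((m.2, m.1).1 = -1) from hm2), if_pos ⟨hsuit, hmnt⟩]]
    · have hsuit : PySem.Int.floordiv pc.2 13 ≠ trump := fun h => ht ((pvIs_iff trump pc).2 h)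
      have hT' : (seen ++ [pc]).filter (pvIs trump) = [] := by
        rw [hfT, if_neg ht, List.append_nil, hT]
      refine Or.inr (Or.inr (Or.inl ⟨hT', ?_⟩))
      by_cases hl : pvIs lead pc
      · have hsl : PySem.Int.floordiv pc.2 13 = lead := (pvIs_iff lead pc).1 hl
        refine ⟨if pvKey m < pvKey pc then pc else m, ?_, ?_⟩
        · rw [hfL, if_pos hl, max?_append_singleton, hm]
          by_cases hlt : pvKey m < pvKey pc <;> simp [hlt]
        · by_cases hlt : pvKey m < pvKey pc
          · rw [show stepA lead trump (m.2, m.1) pc = (pc.2, pc.1) from by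
              unfold stepA
              rw [if_neg (show ¬((m.2, m.1).1 = -1) from hm2),
                if_neg (by rintro ⟨h1, -⟩; exact hsuit h1),
                if_pos ⟨hsl.trans hmsuit.symm, hlt⟩], if_pos hlt]
          · rw [show stepA lead trump (m.2, m.1) pc = (m.2, m.1) from by
              unfold stepA
              rw [if_neg (show ¬((m.2, m.1).1 = -1) from hm2),
                if_neg (by rintro ⟨h1, -⟩; exact hsuit h1),
                if_neg (by rintro ⟨-, h2⟩; exact hlt h2),
                if_neg (by rintro ⟨-, -, h3⟩; exact h3 hmsuit)], if_neg hlt]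
      · have hsl : PySem.Int.floordiv pc.2 13 ≠ lead := fun h => hl ((pvIs_iff lead pc).2 h)
        refine ⟨m, ?_, ?_⟩
        · rw [hfL, if_neg hl, List.append_nil, hm]
        · rw [show stepA lead trump (m.2, m.1) pc = (m.2, m.1) from by
            unfold stepA
            rw [if_neg (show ¬((m.2, m.1).1 = -1) from hm2),
              if_neg (by rintro ⟨h1, -⟩; exact hsuit h1),
              if_neg (by rintro ⟨h1, -⟩; exact hsl (h1.trans hmsuit)),
              if_neg (by rintro ⟨h1, -⟩; exact hsl h1)]]
  · -- K3: no trump and no lead seen yet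
    have hq2 : q.2 ≠ -1 := hseen q hq
    have hqnt : PySem.Int.floordiv q.2 13 ≠ trump := by
      intro hEq
      have hmem' : q ∈ seen.filter (pvIs trump) :=
        List.mem_filter.2 ⟨hq, (pvIs_iff trump q).2 hEq⟩
      rw [hT] at hmem'
      simp at hmem'
    have hqnl : PySem.Int.floordiv q.2 13 ≠ lead := by
      intro hEq
      have hmem' : q ∈ seen.filter (pvIs lead) :=
        List.mem_filter.2 ⟨hq, (pvIs_iff lead q).2 hEq⟩
      rw [hL] at hmem'
      simp at hmem'
    subst hs
    by_cases ht : pvIs trump pc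
    · have hsuit : PySem.Int.floordiv pc.2 13 = trump := (pvIs_iff trump pc).1 ht
      refine Or.inr (Or.inl ⟨pc, ?_, ?_⟩)
      · rw [hfT, if_pos ht, hT, List.nil_append, max?_singleton]
      · rw [show stepA lead trump (q.2, q.1) pc = (pc.2, pc.1) from by
          unfold stepA
          rw [if_neg (show ¬((q.2, q.1).1 = -1) from hq2), if_pos ⟨hsuit, hqnt⟩]]
    · have hsuit : PySem.Int.floordiv pc.2 13 ≠ trump := fun h => ht ((pvIs_iff trump pc).2 h)
      have hT' : (seen ++ [pc]).filter (pvIs trump) = [] := by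
        rw [hfT, if_neg ht, List.append_nil, hT]
      by_cases hl : pvIs lead pc
      · have hsl : PySem.Int.floordiv pc.2 13 = lead := (pvIs_iff lead pc).1 hl
        refine Or.inr (Or.inr (Or.inl ⟨hT', pc, ?_, ?_⟩))
        · rw [hfL, if_pos hl, hL, List.nil_append, max?_singleton]
        · rw [show stepA lead trump (q.2, q.1) pc = (pc.2, pc.1) from by
            unfold stepA
            rw [if_neg (show ¬((q.2, q.1).1 = -1) from hq2),
              if_neg (by rintro ⟨h1, -⟩; exact hsuit h1),
              if_neg (by rintro ⟨h1, -⟩; exact hqnl (h1 ▸ hsl)),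
              if_pos ⟨hsl, hqnt, hqnl⟩]]
      · have hL' : (seen ++ [pc]).filter (pvIs lead) = [] := by
          rw [hfL, if_neg hl, List.append_nil, hL]
        refine Or.inr (Or.inr (Or.inr ⟨hT', hL', ?_⟩))
        have hsl : PySem.Int.floordiv pc.2 13 ≠ lead := fun h => hl ((pvIs_iff lead pc).2 h)
        by_cases hb2 : PySem.Int.floordiv pc.2 13 = PySem.Int.floordiv q.2 13 ∧
            PySem.Int.mod pc.2 13 > PySem.Int.mod q.2 13
        · refine ⟨pc, by simp, ?_⟩
          rw [show stepA lead trump (q.2, q.1) pc = (pc.2, pc.1) from by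
            unfold stepA
            rw [if_neg (show ¬((q.2, q.1).1 = -1) from hq2),
              if_neg (by rintro ⟨h1, -⟩; exact hsuit h1),
              if_pos hb2]]
        · refine ⟨q, by simp [hq], ?_⟩
          rw [show stepA lead trump (q.2, q.1) pc = (q.2, q.1) from by
            unfold stepA
            rw [if_neg (show ¬((q.2, q.1).1 = -1) from hq2),
              if_neg (by rintro ⟨h1, -⟩; exact hsuit h1),
              if_neg hb2,
              if_neg (by rintro ⟨h1, -⟩; exact hsl h1)]]

theorem inv_fold (lead trump : Int) (ps : List (Int × Int)) :
    ∀ (seen : List (Int × Int)) (s : Int × Int),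
      (∀ q ∈ seen ++ ps, q.2 ≠ -1) → pvInv lead trump seen s →
      pvInv lead trump (seen ++ ps) (ps.foldl (stepA lead trump) s) := by
  induction ps with
  | nil => intro seen s _ h; simpa using h
  | cons pc rest ih =>
    intro seen s hall h
    have h1 : pvInv lead trump (seen ++ [pc]) (stepA lead trump s pc) :=
      inv_step lead trump seen s pc (fun q hq => hall q (by simp [hq]))
        (hall pc (by simp)) h
    have h2 := ih (seen ++ [pc]) (stepA lead trump s pc)
      (by intro q hq; apply hall; simpa using hq) h1
    simpa using h2

theorem best_card_spec' (trick : List Int) (trump : Int) (first_player : Int)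
    (hpre : Pre_best_card trick trump first_player) :
    best_card trick trump first_player = best_card_alt trick trump first_player := by
  obtain ⟨hir, hno⟩ := hpre
  set lead := PySem.Int.floordiv (PySem.List.pyGetD trick first_player 0) 13 with hlead
  set E := PySem.List.enumerate trick 0 with hE
  have hall : ∀ q ∈ E, q.2 ≠ -1 := by
    intro q hq
    rcases (PySem.List.mem_enumerate_iff _ _ _).1 hq with ⟨k, hk, rfl⟩
    intro hEq
    exact hno (hEq ▸ List.getElem_mem hk)
  have hinv : pvInv lead trump E (E.foldl (stepA lead trump) (-1, -1)) := by
    have := inv_fold lead trump E [] (-1, -1) (by simpa using hall) (Or.inl ⟨rfl, rfl⟩)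
    simpa using this
  have hledmem : PySem.List.pyGetD trick first_player 0 ∈ trick :=
    PySem.List.pyGetD_mem trick 0 hir
  have hledE : ∃ pc ∈ E, PySem.Int.floordiv pc.2 13 = lead := by
    rcases List.mem_iff_getElem.1 hledmem with ⟨k, hk, hkv⟩
    refine ⟨(k, trick[k]), ?_, by rw [hkv]⟩
    exact (PySem.List.mem_enumerate_iff _ _ _).2 ⟨k, hk, by simp⟩
  have hEne : E ≠ [] := by
    rcases hledE with ⟨pc, hpc, -⟩
    intro h; rw [h] at hpc; simp at hpc
  have hba : best_card_alt trick trump first_player =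
      (match PySem.List.max?
          (if E.filter (pvIs trump) = [] then E.filter (pvIs lead) else E.filter (pvIs trump))
          pvKey with
        | some m => m.1
        | none => -1) := rfl
  rw [hba]
  show (E.foldl (stepA lead trump) (-1, -1)).2 = _
  rcases hinv with ⟨h0, -⟩ | ⟨m, hm, hs⟩ | ⟨hT, m, hm, hs⟩ | ⟨hT, hL, q, hq, hs⟩
  · exact absurd h0 hEne
  · -- trump winner on both sides
    have hTne : E.filter (pvIs trump) ≠ [] := by
      intro h
      rw [h] at hm
      simp [PySem.List.max?] at hm
    rw [if_neg hTne, hm, hs]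
  · -- lead-suit winner on both sides
    rw [if_pos hT, hm, hs]
  · -- impossible: the led pair is a lead-suit pair
    rcases hledE with ⟨pc, hpc, hpcl⟩
    have hmem' : pc ∈ E.filter (pvIs lead) :=
      List.mem_filter.2 ⟨hpc, (pvIs_iff lead pc).2 hpcl⟩
    rw [hL] at hmem'
    simp at hmem'

-- ===== VERDICT (by name: the statement is the Claim_ definition above) =====
theorem best_card_spec : Claim_equal_best_card := by
  intro trick trump first_player _ hpre
  exact best_card_spec' trick trump first_player hpre
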